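-- pv_equiv track=rewrite | github.com/pepeariel/CrmApi | Pipeline.py | GetQNTD
-- ===== SOURCE A (Python) =====
-- def GetQNTD(series, valor):
--     if len(series) == 0:
--         valor = 1
--     elif len(series) == 1:
--         valor = int(series[0])
--     else:
--         mais_de_um_valor = []
--         for valores in series:
--             mais_de_um_valor.append(int(valores))
--             valor = sum(mais_de_um_valor)
--     return valor
-- ===== SOURCE B (Python) =====
-- def GetQNTD(series, valor):
--     # Empty series counts as 1; otherwise the sum of the series
--     # (which for a single element is that element, as in A).
--     return sum(series) if series else 1
-- ===== Notes on version B (the rewrite author's own statement) =====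
-- stated objective: faster
-- what changed: Replaces the branch-heavy loop that rebuilds a list and re-sums it on every iteration with a single built-in sum over the list (empty list still yields 1).
import Mathlib
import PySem

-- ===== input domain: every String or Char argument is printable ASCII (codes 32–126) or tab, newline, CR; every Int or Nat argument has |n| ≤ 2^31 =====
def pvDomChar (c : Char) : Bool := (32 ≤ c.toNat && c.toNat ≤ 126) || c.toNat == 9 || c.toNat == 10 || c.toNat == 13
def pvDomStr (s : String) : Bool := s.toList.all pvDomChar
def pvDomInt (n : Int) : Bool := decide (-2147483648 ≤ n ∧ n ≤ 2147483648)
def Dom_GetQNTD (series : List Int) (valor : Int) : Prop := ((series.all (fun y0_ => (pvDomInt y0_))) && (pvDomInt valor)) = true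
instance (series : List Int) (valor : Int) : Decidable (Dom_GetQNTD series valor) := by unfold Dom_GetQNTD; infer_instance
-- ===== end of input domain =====

-- B replaces A's loop that re-sums a growing list each iteration by one built-in sum (empty → 1): asymptotically faster.


-- ===== PORT A =====
-- literal transliteration of A: the else-branch appends each element to a list
-- and re-sums that whole list on every iteration, keeping the last sum in valor
def GetQNTD (series : List Int) (valor : Int) : Int :=
  if series.length = 0 then
    1
  else if series.length = 1 then
    (PySem.List.pyGet? series 0).getD 0   -- in-range here: length = 1
  else
    (series.foldl (fun (st : List Int × Int) x =>
        let l := st.1 ++ [x]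
        (l, l.sum)) ([], valor)).2

-- ===== PORT B =====
def GetQNTD_alt (series : List Int) (valor : Int) : Int :=
  if series.isEmpty then 1 else series.sum

-- ===== PRECONDITION & SPEC =====
def Spec_GetQNTD (series : List Int) (valor : Int) (out : Int) : Prop := out = GetQNTD_alt series valor
instance (series : List Int) (valor : Int) (out : Int) : Decidable (Spec_GetQNTD series valor out) := by unfold Spec_GetQNTD; infer_instance

-- ===== CLAIM (what is proved, stated in full; the proofs are below) =====
def Claim_equal_GetQNTD : Prop := ∀ (series : List Int) (valor : Int), Dom_GetQNTD series valor → Spec_GetQNTD series valor (GetQNTD series valor)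

-- ===== LEMMAS AND PROOFS =====
-- loop invariant: the second component after folding the rest is (acc ++ rest).sum, for nonempty rest
theorem GetQNTD_fold_sum (rest : List Int) (acc : List Int) (v : Int) (h : rest ≠ []) :
    (rest.foldl (fun (st : List Int × Int) x =>
        let l := st.1 ++ [x]
        (l, l.sum)) (acc, v)).2 = (acc ++ rest).sum := by
  induction rest generalizing acc v with
  | nil => exact absurd rfl h
  | cons a t ih =>
    simp only [List.foldl]
    cases t with
    | nil => simp
    | cons b u =>
      rw [ih (acc ++ [a]) _ (by simp)]
      simp

-- ===== VERDICT (by name: the statement is the Claim_ definition above) =====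
theorem GetQNTD_spec : Claim_equal_GetQNTD := by
  intro series valor _
  unfold Spec_GetQNTD GetQNTD GetQNTD_alt
  match series with
  | [] => simp
  | [a] => simp [PySem.List.pyGet?, PySem.List.pyIdx?]
  | a :: b :: t =>
    rw [if_neg (by simp), if_neg (by simp), if_neg (by simp)]
    rw [GetQNTD_fold_sum _ [] valor (by simp)]
    simp
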